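-- pv_equiv track=rewrite | github.com/OWASP/cornucopia | fix_lint6.py | fix_consistent_type_assertions
-- ===== SOURCE A (Python) =====
-- def fix_consistent_type_assertions(c):
--     # x as T  →  (x satisfies T) or just disable
--     # Add eslint-disable for complex cases
--     lines, result = c.split('\n'), []
--     for line in lines:
--         stripped = line.lstrip()
--         indent = line[:len(line)-len(stripped)]
--         if ' as ' in stripped and 'import' not in stripped:
--             prev = result[-1].strip() if result else ''
--             if 'eslint-disable' not in prev and 'eslint-disable' not in stripped:
--                 result.append(f'{indent}// eslint-disable-next-line @typescript-eslint/consistent-type-assertions -- pre-existing')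
--         result.append(line)
--     return '\n'.join(result)
-- ===== SOURCE B (Python) =====
-- def fix_consistent_type_assertions(c):
--     # Accumulator-free: pair each line with its predecessor and emit blocks.
--     comment = '// eslint-disable-next-line @typescript-eslint/consistent-type-assertions -- pre-existing'
--     lines = c.split('\n')
--
--     def emit(prev, line):
--         stripped = line.lstrip()
--         if (' as ' in stripped and 'import' not in stripped
--                 and 'eslint-disable' not in prev.strip()
--                 and 'eslint-disable' not in stripped):
--             return [line[:len(line) - len(stripped)] + comment, line]
--         return [line]
--
--     return '\n'.join(x for p, l in zip([''] + lines, lines) for x in emit(p, l))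
-- ===== Notes on version B (the rewrite author's own statement) =====
-- stated objective: simpler
-- what changed: Replaces A's stateful accumulator loop that peeks result[-1] for the previous line with an accumulator-free pass: zip each line with its predecessor and flatMap a pure per-line emitter, exploiting the invariant that A's result[-1] is always the previous raw line.
import Mathlib
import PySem

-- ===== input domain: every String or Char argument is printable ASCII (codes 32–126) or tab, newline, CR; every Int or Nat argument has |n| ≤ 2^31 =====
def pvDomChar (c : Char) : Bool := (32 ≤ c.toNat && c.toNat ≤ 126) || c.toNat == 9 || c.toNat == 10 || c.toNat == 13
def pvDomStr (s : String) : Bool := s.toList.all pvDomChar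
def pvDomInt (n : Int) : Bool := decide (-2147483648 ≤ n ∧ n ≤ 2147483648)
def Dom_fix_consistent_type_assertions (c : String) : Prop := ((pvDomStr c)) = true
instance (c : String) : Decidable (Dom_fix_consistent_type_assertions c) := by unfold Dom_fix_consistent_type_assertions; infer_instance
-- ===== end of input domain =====

-- B replaces A's accumulator-peeking loop (prev = result[-1]) by an accumulator-free
-- pass over lines zipped with their predecessors; objective: simpler, same cost.

-- the inserted comment line's text (shared literal of both Python programs)
def pvComment : String := "// eslint-disable-next-line @typescript-eslint/consistent-type-assertions -- pre-existing"

-- ===== PORT A =====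
-- one iteration of A's loop body: conditionally append the comment, then append the line
def pvStepA (result : List String) (line : String) : List String :=
  let stripped := PySem.Str.lstrip line
  let indent := PySem.Str.slice line none
      (some ((PySem.Str.len line : Int) - (PySem.Str.len stripped : Int)))
  let result1 :=
    if PySem.Str.isIn " as " stripped && !PySem.Str.isIn "import" stripped then
      let prev := match result.getLast? with
        | some r => PySem.Str.strip r
        | none => ""
      if !PySem.Str.isIn "eslint-disable" prev && !PySem.Str.isIn "eslint-disable" stripped then
        result ++ [indent ++ pvComment]
      else result
    else result
  result1 ++ [line]

def fix_consistent_type_assertions (c : String) : String :=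
  PySem.Str.join "\n" (((PySem.Str.split? c "\n").getD []).foldl pvStepA [])   -- sep "\n" ≠ "": split? is never none

-- ===== PORT B =====
-- B's emit: the lines the output block for (previous raw line, line) consists of
def pvEmit (prev line : String) : List String :=
  if PySem.Str.isIn " as " (PySem.Str.lstrip line)
      && !PySem.Str.isIn "import" (PySem.Str.lstrip line)
      && !PySem.Str.isIn "eslint-disable" (PySem.Str.strip prev)
      && !PySem.Str.isIn "eslint-disable" (PySem.Str.lstrip line) then
    [PySem.Str.slice line none
        (some ((PySem.Str.len line : Int) - (PySem.Str.len (PySem.Str.lstrip line) : Int))) ++ pvComment,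
     line]
  else [line]

-- join of the zip-with-predecessor flatMap (B's last line)
def pvJoinBlocks (lines : List String) : String :=
  PySem.Str.join "\n" ((List.zip ("" :: lines) lines).flatMap (fun pl => pvEmit pl.1 pl.2))

def fix_consistent_type_assertions_alt (c : String) : String :=
  pvJoinBlocks ((PySem.Str.split? c "\n").getD [])   -- sep "\n" ≠ "": split? is never none

-- ===== PRECONDITION & SPEC =====
def Spec_fix_consistent_type_assertions (c : String) (out : String) : Prop := out = fix_consistent_type_assertions_alt c
instance (c : String) (out : String) : Decidable (Spec_fix_consistent_type_assertions c out) := by unfold Spec_fix_consistent_type_assertions; infer_instance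

-- ===== CLAIM (what is proved, stated in full; the proofs are below) =====
def Claim_equal_fix_consistent_type_assertions : Prop := ∀ (c : String), Dom_fix_consistent_type_assertions c → Spec_fix_consistent_type_assertions c (fix_consistent_type_assertions c)

-- ===== LEMMAS AND PROOFS =====

-- one A-step over an accumulator whose stripped last element is strip p is an append of B's block
theorem pvStepA_eq_emit (acc : List String) (p line : String)
    (h : (match acc.getLast? with | some r => PySem.Str.strip r | none => "") = PySem.Str.strip p) :
    pvStepA acc line = acc ++ pvEmit p line := by
  unfold pvStepA pvEmit
  rw [h]
  cases hA : PySem.Str.isIn " as " (PySem.Str.lstrip line) <;>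
  cases hI : PySem.Str.isIn "import" (PySem.Str.lstrip line) <;>
  cases hP : PySem.Str.isIn "eslint-disable" (PySem.Str.strip p) <;>
  cases hS : PySem.Str.isIn "eslint-disable" (PySem.Str.lstrip line) <;>
  simp_all

-- B's block always ends with the raw line
theorem pvEmit_getLast? (acc : List String) (p line : String) :
    (acc ++ pvEmit p line).getLast? = some line := by
  unfold pvEmit
  split <;> simp [List.getLast?_append]

-- the loop invariant: A's fold from any accumulator whose last stripped entry is strip p
-- equals that accumulator followed by B's flatMap of predecessor pairs
theorem pvFold (lines : List String) (p : String) (acc : List String)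
    (h : (match acc.getLast? with | some r => PySem.Str.strip r | none => "") = PySem.Str.strip p) :
    lines.foldl pvStepA acc
      = acc ++ (List.zip (p :: lines) lines).flatMap (fun pl => pvEmit pl.1 pl.2) := by
  induction lines generalizing p acc with
  | nil => simp
  | cons l rest ih =>
    rw [List.foldl_cons, pvStepA_eq_emit acc p l h,
        ih l (acc ++ pvEmit p l) (by rw [pvEmit_getLast? acc p l])]
    simp [List.zip_cons_cons]

-- ===== VERDICT (by name: the statement is the Claim_ definition above) =====
theorem fix_consistent_type_assertions_spec : Claim_equal_fix_consistent_type_assertions := by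
  intro c _
  unfold Spec_fix_consistent_type_assertions fix_consistent_type_assertions fix_consistent_type_assertions_alt pvJoinBlocks
  rw [pvFold _ "" [] (by decide)]
  simp
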